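-- pv_equiv track=rewrite | github.com/unwarkz/blackicekz.github.io | .github/scripts/translate_i18n.py | build_object_str
-- ===== SOURCE A (Python) =====
-- def build_object_str(lang_key, translations):
--     """Build the JS object string for a language."""
--     lines = [f"    {lang_key}: {{"]
--     items = list(translations.items())
--     for i, (key, value) in enumerate(items):
--         escaped = value.replace("\\", "\\\\").replace("'", "\\'")
--         comma = "," if i < len(items) - 1 else ""
--         lines.append(f"      '{key}': '{escaped}'{comma}")
--     lines.append("    }")
--     return "\n".join(lines)
-- ===== SOURCE B (Python) =====
-- def build_object_str(lang_key, translations):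
--     """Build the JS object string for a language."""
--     body = ""
--     for key, value in reversed(list(translations.items())):
--         escaped = "".join(
--             "\\\\" if c == "\\" else "\\'" if c == "'" else c for c in value
--         )
--         line = "\n      '" + key + "': '" + escaped + "'"
--         body = line + ("," if body else "") + body
--     return "    " + lang_key + ": {" + body + "\n    }"
-- ===== Notes on version B (the rewrite author's own statement) =====
-- stated objective: alternative
-- what changed: B builds the body string back to front by iterating the items in reverse, deciding each comma by whether the accumulated body is nonempty, and escapes values character by character instead of A's two whole-string replaces, list of lines, enumerate and join.
import Mathlib
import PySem

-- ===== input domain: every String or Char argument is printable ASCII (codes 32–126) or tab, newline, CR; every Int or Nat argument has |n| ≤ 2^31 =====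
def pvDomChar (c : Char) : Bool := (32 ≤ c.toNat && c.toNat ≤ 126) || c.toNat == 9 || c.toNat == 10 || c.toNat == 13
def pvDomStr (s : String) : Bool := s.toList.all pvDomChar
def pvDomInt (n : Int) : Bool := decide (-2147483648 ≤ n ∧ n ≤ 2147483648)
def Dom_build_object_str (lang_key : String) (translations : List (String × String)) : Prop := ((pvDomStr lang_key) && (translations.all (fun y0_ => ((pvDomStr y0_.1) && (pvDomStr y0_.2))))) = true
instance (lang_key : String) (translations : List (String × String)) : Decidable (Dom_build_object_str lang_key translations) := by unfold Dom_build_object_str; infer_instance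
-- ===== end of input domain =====

-- B walks the items in reverse, building the body string back to front with a per-item
-- comma decided by "is the accumulated body nonempty", and escapes each value character
-- by character — no line list, no join, no enumerate (alternative decomposition).

-- ===== PORT A =====
def build_object_str (lang_key : String) (translations : List (String × String)) : String :=
  let lines : List String := ["    " ++ lang_key ++ ": {"]
  let items := translations
  let lines := (PySem.List.enumerate items 0).foldl
    (fun lines p =>
      let escaped := PySem.Str.replace (PySem.Str.replace p.2.2 "\\" "\\\\") "'" "\\'"
      let comma := if p.1 < (items.length : Int) - 1 then "," else ""
      lines ++ ["      '" ++ p.2.1 ++ "': '" ++ escaped ++ "'" ++ comma]) lines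
  let lines := lines ++ ["    }"]
  PySem.Str.join "\n" lines

-- ===== PORT B =====
-- char-wise escaper (Python's esc-per-character conditional expression)
def pvEscChar (c : Char) : List Char :=
  if c = '\\' then ['\\', '\\'] else if c = '\'' then ['\\', '\''] else [c]

def build_object_str_alt (lang_key : String) (translations : List (String × String)) : String :=
  let body := translations.reverse.foldl
    (fun body kv =>
      let escaped := String.ofList (kv.2.toList.flatMap pvEscChar)
      let line := "\n      '" ++ kv.1 ++ "': '" ++ escaped ++ "'"
      line ++ (if body.isEmpty then "" else ",") ++ body) ""
  "    " ++ lang_key ++ ": {" ++ body ++ "\n    }"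

-- ===== PRECONDITION & SPEC =====
def Spec_build_object_str (lang_key : String) (translations : List (String × String)) (out : String) : Prop := out = build_object_str_alt lang_key translations
instance (lang_key : String) (translations : List (String × String)) (out : String) : Decidable (Spec_build_object_str lang_key translations out) := by unfold Spec_build_object_str; infer_instance

-- ===== CLAIM (what is proved, stated in full; the proofs are below) =====
def Claim_equal_build_object_str : Prop := ∀ (lang_key : String) (translations : List (String × String)), Dom_build_object_str lang_key translations → Spec_build_object_str lang_key translations (build_object_str lang_key translations)

-- ===== LEMMAS AND PROOFS =====

-- ---- single-character replace is a flatMap substitution ----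
theorem pv_go_single (x : Char) (new : List Char) :
    ∀ (l : List Char) (fuel : Nat) (acc : List Char), l.length ≤ fuel →
      PySem.Chars.replace.go [x] new fuel l acc =
        acc.reverse ++ l.flatMap (fun c => if c = x then new else [c]) := by
  intro l
  induction l with
  | nil =>
    intro fuel acc _
    cases fuel <;> simp [PySem.Chars.replace.go]
  | cons c t ih =>
    intro fuel acc h
    cases fuel with
    | zero => simp at h
    | succ f =>
      have hstep : PySem.Chars.replace.go [x] new (f+1) (c::t) acc =
          if ([x] : List Char).isPrefixOf (c::t) then
            PySem.Chars.replace.go [x] new f (List.drop 1 (c::t)) (new.reverse ++ acc)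
          else PySem.Chars.replace.go [x] new f t (c::acc) := by
        simp [PySem.Chars.replace.go]
      rw [hstep]
      have ht : t.length ≤ f := by simpa using h
      by_cases hc : c = x
      · subst hc
        rw [if_pos (by simp [List.isPrefixOf])]
        rw [show List.drop 1 (c :: t) = t from rfl, ih f (new.reverse ++ acc) ht]
        simp
      · rw [if_neg (by simp [List.isPrefixOf]; exact fun h => hc h.symm)]
        rw [ih f (c :: acc) ht]
        simp [hc]

theorem pv_replace_single (s : List Char) (x : Char) (new : List Char) :
    PySem.Chars.replace s [x] new = s.flatMap (fun c => if c = x then new else [c]) := by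
  unfold PySem.Chars.replace
  simp [pv_go_single x new s s.length [] (le_refl _)]

-- ---- A's two sequential replaces equal B's char-wise escape ----
theorem pv_escape_eq (l : List Char) :
    PySem.Chars.replace (PySem.Chars.replace l ['\\'] ['\\', '\\']) ['\''] ['\\', '\''] =
      l.flatMap pvEscChar := by
  rw [pv_replace_single, pv_replace_single, List.flatMap_assoc]
  apply List.flatMap_congr
  intro c _
  by_cases hb : c = '\\'
  · subst hb; simp [pvEscChar]
  · by_cases hq : c = '\''
    · subst hq; simp [pvEscChar]
    · simp [pvEscChar, hb, hq]

-- ---- shared char-level building blocks ----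
def pvItemC (kv : String × String) : List Char :=
  "      '".toList ++ kv.1.toList ++ "': '".toList ++ kv.2.toList.flatMap pvEscChar ++ ['\'']

-- A-side: append "," to every element but the last
def pvCommaifyS : List String → List String
  | [] => []
  | [x] => [x]
  | x :: y :: xs => (x ++ ",") :: pvCommaifyS (y :: xs)

def pvCommaifyC : List (List Char) → List (List Char)
  | [] => []
  | [x] => [x]
  | x :: y :: xs => (x ++ [',']) :: pvCommaifyC (y :: xs)

theorem pv_map_toList_commaify : ∀ (ls : List String),
    (pvCommaifyS ls).map String.toList = pvCommaifyC (ls.map String.toList) := by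
  intro ls
  induction ls with
  | nil => rfl
  | cons x xs ih =>
    cases xs with
    | nil => rfl
    | cons y ys => simp [pvCommaifyS, pvCommaifyC, ih]

theorem pv_foldl_append {α β : Type} (g : α → β) :
    ∀ (l : List α) (init : List β),
      l.foldl (fun acc x => acc ++ [g x]) init = init ++ l.map g := by
  intro l
  induction l with
  | nil => intro init; simp
  | cons x xs ih => intro init; simp [List.foldl, ih]

theorem pv_enum_map_commaify (g : String × String → String) :
    ∀ (l : List (String × String)) (s : Int),
      (PySem.List.enumerate l s).map
          (fun p => g p.2 ++ (if p.1 < s + (l.length : Int) - 1 then "," else "")) =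
        pvCommaifyS (l.map g) := by
  intro l
  induction l with
  | nil => intro s; simp [PySem.List.enumerate_nil, pvCommaifyS]
  | cons x xs ih =>
    intro s
    cases xs with
    | nil =>
      simp [PySem.List.enumerate_cons, PySem.List.enumerate_nil, pvCommaifyS]
    | cons y ys =>
      have h := ih (s + 1)
      have harith : s + 1 + ((y :: ys).length : Int) - 1 = s + ((x :: y :: ys).length : Int) - 1 := by
        simp; omega
      rw [harith] at h
      have hlt : s < s + ((x :: y :: ys).length : Int) - 1 := by simp; omega
      rw [PySem.List.enumerate_cons, List.map_cons, h]
      simp [pvCommaifyS]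

theorem pv_enum_map_commaify0 (g : String × String → String) (l : List (String × String)) :
    (PySem.List.enumerate l 0).map
        (fun p => g p.2 ++ (if p.1 < (l.length : Int) - 1 then "," else "")) =
      pvCommaifyS (l.map g) := by
  have h := pv_enum_map_commaify g l 0
  simpa using h

theorem pv_join_cons (sep a : List Char) (rest : List (List Char)) (h : rest ≠ []) :
    PySem.Chars.join sep (a :: rest) = a ++ sep ++ PySem.Chars.join sep rest := by
  cases rest with
  | nil => exact absurd rfl h
  | cons b r => simp [PySem.Chars.join_cons_cons]

theorem pv_join_commaify (f : List Char) :
    ∀ (ls : List (List Char)), ls ≠ [] →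
      PySem.Chars.join ['\n'] (pvCommaifyC ls ++ [f]) =
        PySem.Chars.join [',', '\n'] ls ++ ['\n'] ++ f := by
  intro ls
  induction ls with
  | nil => intro h; exact absurd rfl h
  | cons x xs ih =>
    intro _
    cases xs with
    | nil =>
      simp [pvCommaifyC, PySem.Chars.join_cons_cons, PySem.Chars.join_singleton]
    | cons y ys =>
      have hne : (y :: ys : List (List Char)) ≠ [] := by simp
      have h1 : pvCommaifyC (y :: ys) ++ [f] ≠ [] := by simp
      rw [show pvCommaifyC (x :: y :: ys) = (x ++ [',']) :: pvCommaifyC (y :: ys) from rfl]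
      rw [List.cons_append, pv_join_cons _ _ _ h1, ih hne,
        pv_join_cons [',', '\n'] x (y :: ys) hne]
      simp

-- ---- per-item line of A equals pvItemC ----
theorem pv_itemA_toList (kv : String × String) :
    ("      '" ++ kv.1 ++ "': '" ++
      PySem.Str.replace (PySem.Str.replace kv.2 "\\" "\\\\") "'" "\\'" ++ "'").toList =
    pvItemC kv := by
  simp only [String.toList_append, PySem.Str.toList_replace, pvItemC]
  rw [show ("\\" : String).toList = ['\\'] from by decide,
      show ("\\\\" : String).toList = ['\\', '\\'] from by decide,
      show ("'" : String).toList = ['\''] from by decide,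
      show ("\\'" : String).toList = ['\\', '\''] from by decide,
      pv_escape_eq]

-- ---- B-side: char-level back-to-front body ----
def pvBodyC : List (String × String) → List Char
  | [] => []
  | kv :: rest =>
    ('\n' :: pvItemC kv) ++ (if (pvBodyC rest).isEmpty then [] else [',']) ++ pvBodyC rest

theorem pv_isEmpty_toList (s : String) : s.isEmpty = s.toList.isEmpty := by
  rw [Bool.eq_iff_iff, String.isEmpty_iff, List.isEmpty_iff, ← String.toList_inj]
  simp

-- the String foldr computed by B's reversed foldl equals pvBodyC, char-wise
theorem pv_body_toList : ∀ (l : List (String × String)),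
    (l.foldr (fun kv body =>
      ("\n      '" ++ kv.1 ++ "': '" ++ String.ofList (kv.2.toList.flatMap pvEscChar) ++ "'")
        ++ (if body.isEmpty then "" else ",") ++ body) "").toList = pvBodyC l := by
  intro l
  induction l with
  | nil => rfl
  | cons kv rest ih =>
    simp only [List.foldr, pvBodyC]
    rw [String.toList_append, String.toList_append]
    have hl : ("\n      '" ++ kv.1 ++ "': '" ++
        String.ofList (kv.2.toList.flatMap pvEscChar) ++ "'").toList = '\n' :: pvItemC kv := by
      simp only [String.toList_append, String.toList_ofList, pvItemC]
      rw [show ("\n      '" : String).toList = '\n' :: ("      '" : String).toList from by decide,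
          show ("'" : String).toList = ['\''] from by decide]
      simp
    have hcomma : (if ((rest.foldr (fun kv body =>
        ("\n      '" ++ kv.1 ++ "': '" ++ String.ofList (kv.2.toList.flatMap pvEscChar) ++ "'")
          ++ (if body.isEmpty then "" else ",") ++ body) "")).isEmpty then ("" : String) else ",").toList
        = (if (pvBodyC rest).isEmpty then ([] : List Char) else [',']) := by
      rw [pv_isEmpty_toList, ih]
      split <;> decide
    rw [hl, hcomma, ih]

-- pvBodyC expressed with the ",\n"-join of the item lines
theorem pv_bodyC_join : ∀ (l : List (String × String)), l ≠ [] →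
    pvBodyC l = '\n' :: PySem.Chars.join [',', '\n'] (l.map pvItemC) := by
  intro l
  induction l with
  | nil => intro h; exact absurd rfl h
  | cons kv rest ih =>
    intro _
    cases rest with
    | nil => simp [pvBodyC, PySem.Chars.join_singleton]
    | cons kv2 r2 =>
      have hne : (kv2 :: r2 : List (String × String)) ≠ [] := by simp
      have hb := ih hne
      rw [show pvBodyC (kv :: kv2 :: r2) =
        ('\n' :: pvItemC kv) ++ (if (pvBodyC (kv2 :: r2)).isEmpty then [] else [',']) ++ pvBodyC (kv2 :: r2) from rfl]
      rw [hb, show List.map pvItemC (kv :: kv2 :: r2) =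
            pvItemC kv :: pvItemC kv2 :: List.map pvItemC r2 from rfl,
        pv_join_cons [',', '\n'] (pvItemC kv) (pvItemC kv2 :: List.map pvItemC r2) (by simp)]
      simp

-- ===== VERDICT (by name: the statement is the Claim_ definition above) =====
theorem build_object_str_spec : Claim_equal_build_object_str := by
  intro lang_key translations _
  unfold Spec_build_object_str build_object_str build_object_str_alt
  simp only
  rw [pv_foldl_append (fun p : Int × (String × String) =>
        "      '" ++ p.2.1 ++ "': '" ++
          PySem.Str.replace (PySem.Str.replace p.2.2 "\\" "\\\\") "'" "\\'" ++ "'" ++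
          (if p.1 < (translations.length : Int) - 1 then "," else ""))]
  rw [pv_enum_map_commaify0 (fun kv : String × String =>
        "      '" ++ kv.1 ++ "': '" ++
          PySem.Str.replace (PySem.Str.replace kv.2 "\\" "\\\\") "'" "\\'" ++ "'") translations]
  rw [List.foldl_reverse]
  apply String.toList_inj.mp
  rw [String.toList_append, String.toList_append, pv_body_toList]
  have e1 : ("\n" : String).toList = ['\n'] := by decide
  cases translations with
  | nil =>
    simp [pvCommaifyS, pvBodyC, PySem.Str.toList_join, e1,
      PySem.Chars.join_cons_cons, PySem.Chars.join_singleton, String.toList_append]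
  | cons kv rest =>
    have hmap : List.map String.toList (pvCommaifyS (List.map (fun kv : String × String =>
          "      '" ++ kv.1 ++ "': '" ++
            PySem.Str.replace (PySem.Str.replace kv.2 "\\" "\\\\") "'" "\\'" ++ "'") (kv :: rest)))
        = pvCommaifyC (List.map pvItemC (kv :: rest)) := by
      rw [pv_map_toList_commaify, List.map_map]
      congr 1
      apply List.map_congr_left
      intro a _
      exact pv_itemA_toList a
    rw [PySem.Str.toList_join, e1, List.map_append, List.map_append, hmap,
      pv_bodyC_join _ (by simp)]
    rw [show List.map String.toList ["    " ++ lang_key ++ ": {"] =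
          [("    " ++ lang_key ++ ": {").toList] from rfl,
        show List.map String.toList ["    }"] = [("    }" : String).toList] from rfl]
    rw [List.append_assoc, show ([("    " ++ lang_key ++ ": {").toList] : List (List Char)) ++
          (pvCommaifyC (List.map pvItemC (kv :: rest)) ++ [("    }" : String).toList]) =
          ("    " ++ lang_key ++ ": {").toList ::
          (pvCommaifyC (List.map pvItemC (kv :: rest)) ++ [("    }" : String).toList]) from rfl]
    rw [pv_join_cons ['\n'] _ _ (by simp),
      pv_join_commaify _ (List.map pvItemC (kv :: rest)) (by simp)]
    rw [show ("\n    }" : String).toList = '\n' :: ("    }" : String).toList from by decide]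
    simp
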